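-- pv_equiv track=rewrite | github.com/debarghyaRONIN/Pdf_to_json | Pdex.py | convert_text_to_json
-- ===== SOURCE A (Python) =====
-- def convert_text_to_json(text):
--     # Split text into lines
--     lines = text.splitlines()
--
--     data_dict = {}
--     key = None
--
--     # Iterate over each line and build the key-value pairs
--     for i in range(len(lines)):
--         line = lines[i].strip()
--
--         if line:
--             # If this line contains a key (it is followed by another line that is the value)
--             if key is None:
--                 key = line
--             else:
--                 # This line is the value for the previous key
--                 data_dict[key] = line
--                 key = None  # Reset key after assigning the value
--
--     return data_dict
-- ===== SOURCE B (Python) =====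
-- def _value(lines):
--     # First non-empty stripped line and the remainder after it, or None.
--     if not lines:
--         return None
--     val = lines[0].strip()
--     if not val:
--         return _value(lines[1:])
--     return (val, lines[1:])
--
--
-- def _pairs(lines):
--     # Recursively build the (key, value) pair list; a key with no
--     # following non-empty line is dropped.
--     if not lines:
--         return []
--     key = lines[0].strip()
--     if not key:
--         return _pairs(lines[1:])
--     hit = _value(lines[1:])
--     if hit is None:
--         return []
--     val, rest = hit
--     return [(key, val)] + _pairs(rest)
--
--
-- def convert_text_to_json(text):
--     # Recursion on the line structure producing the pair list, then one
--     # dict() call (duplicate keys: last value wins, first position kept).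
--     return dict(_pairs(text.splitlines()))
-- ===== Notes on version B (the rewrite author's own statement) =====
-- stated objective: alternative
-- what changed: Replaces A's single-pass index loop with mutable dict and key/None toggle state by structural recursion: a recursive value-finder and pair-list builder produce the (key, value) list, and one final dict() call builds the mapping.
import Mathlib
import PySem

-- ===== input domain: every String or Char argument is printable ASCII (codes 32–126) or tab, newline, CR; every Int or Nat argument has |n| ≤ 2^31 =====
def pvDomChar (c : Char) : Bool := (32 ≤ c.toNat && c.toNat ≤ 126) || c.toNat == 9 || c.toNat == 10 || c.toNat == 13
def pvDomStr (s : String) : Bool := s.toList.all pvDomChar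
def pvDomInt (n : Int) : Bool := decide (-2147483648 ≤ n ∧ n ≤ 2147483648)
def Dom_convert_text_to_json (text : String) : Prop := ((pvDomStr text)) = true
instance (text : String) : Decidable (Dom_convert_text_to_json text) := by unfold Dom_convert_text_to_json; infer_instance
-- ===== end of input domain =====

-- B replaces A's toggle-state loop by structural recursion (a value-finder and a
-- pair-list builder) followed by one dict construction; objective: alternative.

-- ===== PORT A =====
-- A's loop over the lines: state = (dict so far, pending key or None)
def pvALoop : List String → PySem.Dict String String → Option String → PySem.Dict String String
  | [], d, _ => d
  | l :: rest, d, key =>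
    let line := PySem.Str.strip l
    if line = "" then pvALoop rest d key
    else
      match key with
      | none => pvALoop rest d (some line)
      | some k => pvALoop rest (d.insert k line) none

def convert_text_to_json (text : String) : List (String × String) :=
  (pvALoop (PySem.Str.splitlines text) PySem.Dict.empty none).items

-- ===== PORT B =====
-- _value: first non-empty stripped line with the remainder after it
def pvValue : List String → Option (String × List String)
  | [] => none
  | l :: t =>
    let val := PySem.Str.strip l
    if val = "" then pvValue t else some (val, t)

theorem pvValue_length : ∀ (ls : List String) (v : String) (rest : List String),
    pvValue ls = some (v, rest) → rest.length < ls.length := by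
  intro ls
  induction ls with
  | nil => intro v rest h; simp [pvValue] at h
  | cons l t ih =>
    intro v rest h
    simp only [pvValue] at h
    split at h
    · exact Nat.lt_trans (ih v rest h) (Nat.lt_succ_self _)
    · cases h; simp

-- _pairs: recursively build the (key, value) pair list
def pvPairs : List String → List (String × String)
  | [] => []
  | l :: t =>
    let key := PySem.Str.strip l
    if key = "" then pvPairs t
    else
      match h : pvValue t with
      | none => []
      | some (val, rest) =>
        have : rest.length < t.length := pvValue_length t val rest h
        [(key, val)] ++ pvPairs rest
termination_by ls => ls.length
decreasing_by all_goals (simp only [List.length_cons]; omega)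

def convert_text_to_json_alt (text : String) : List (String × String) :=
  (PySem.Dict.ofList (pvPairs (PySem.Str.splitlines text))).items

-- ===== PRECONDITION & SPEC =====
def Spec_convert_text_to_json (text : String) (out : List (String × String)) : Prop := out = convert_text_to_json_alt text
instance (text : String) (out : List (String × String)) : Decidable (Spec_convert_text_to_json text out) := by unfold Spec_convert_text_to_json; infer_instance

-- ===== CLAIM =====
def Claim_equal_convert_text_to_json : Prop := ∀ (text : String), Dom_convert_text_to_json text → Spec_convert_text_to_json text (convert_text_to_json text)

-- ===== LEMMAS AND PROOFS =====

-- A's loop, characterised: it inserts the consecutive pairs of the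
-- filtered stripped lines (pending key prepended).
def pvPairUp : List String → List (String × String)
  | a :: b :: t => (a, b) :: pvPairUp t
  | _ => []

def pvPend : Option String → List String
  | none => []
  | some k => [k]

theorem pvALoop_eq (ls : List String) :
    ∀ (d : PySem.Dict String String) (key : Option String),
    pvALoop ls d key
      = (pvPairUp (pvPend key ++ (ls.map PySem.Str.strip).filter (· ≠ ""))).foldl
          (fun d p => d.insert p.1 p.2) d := by
  induction ls with
  | nil =>
    intro d key
    cases key <;> simp [pvALoop, pvPend, pvPairUp]
  | cons l rest ih =>
    intro d key
    by_cases h : PySem.Str.strip l = ""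
    · cases key <;> simp [pvALoop, h, ih]
    · cases key with
      | none => simp [pvALoop, h, pvPend, ih]
      | some k => simp [pvALoop, h, pvPend, pvPairUp, ih]

-- pvValue finds the head of the filtered stripped lines
theorem pvValue_filter : ∀ (ls : List String),
    (pvValue ls = none → (ls.map PySem.Str.strip).filter (· ≠ "") = []) ∧
    (∀ v rest, pvValue ls = some (v, rest) →
      (ls.map PySem.Str.strip).filter (· ≠ "")
        = v :: (rest.map PySem.Str.strip).filter (· ≠ "")) := by
  intro ls
  induction ls with
  | nil => simp [pvValue]
  | cons l t ih =>
    by_cases h : PySem.Str.strip l = ""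
    · have e : ((l :: t).map PySem.Str.strip).filter (· ≠ "")
          = (t.map PySem.Str.strip).filter (· ≠ "") := by simp [h]
      constructor
      · intro hn
        rw [e]
        exact ih.1 (by simpa [pvValue, h] using hn)
      · intro v rest hs
        rw [e]
        exact ih.2 v rest (by simpa [pvValue, h] using hs)
    · constructor
      · intro hn; simp [pvValue, h] at hn
      · intro v rest hs
        simp [pvValue, h] at hs
        obtain ⟨hv, hr⟩ := hs
        subst hv; subst hr
        simp [h]

-- B's pair list is the consecutive pairing of the filtered stripped lines
theorem pvPairs_eq : ∀ (ls : List String),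
    pvPairs ls = pvPairUp ((ls.map PySem.Str.strip).filter (· ≠ "")) := by
  have main : ∀ (n : Nat) (ls : List String), ls.length ≤ n →
      pvPairs ls = pvPairUp ((ls.map PySem.Str.strip).filter (· ≠ "")) := by
    intro n
    induction n with
    | zero =>
      intro ls h
      have : ls = [] := List.length_eq_zero_iff.mp (Nat.le_zero.mp h)
      subst this
      simp [pvPairs, pvPairUp]
    | succ n ih =>
      intro ls h
      cases ls with
      | nil => simp [pvPairs, pvPairUp]
      | cons l t =>
        have ht : t.length ≤ n := by
          simpa [List.length_cons, Nat.succ_le_succ_iff] using h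
        by_cases hk : PySem.Str.strip l = ""
        · have e : ((l :: t).map PySem.Str.strip).filter (· ≠ "")
              = (t.map PySem.Str.strip).filter (· ≠ "") := by simp [hk]
          rw [e, show pvPairs (l :: t) = pvPairs t from by simp [pvPairs, hk]]
          exact ih t ht
        · cases hv : pvValue t with
          | none =>
            have e := (pvValue_filter t).1 hv
            have step : pvPairs (l :: t) = [] := by
              simp only [pvPairs]
              rw [if_neg hk]
              split <;> simp_all
            rw [step]
            simp only [List.map_cons, List.filter_cons]
            rw [e]
            simp [hk, pvPairUp]
          | some p =>
            obtain ⟨v, rest⟩ := p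
            have e := (pvValue_filter t).2 v rest hv
            have hr : rest.length ≤ n :=
              Nat.le_of_lt (Nat.lt_of_lt_of_le (pvValue_length t v rest hv) ht)
            have step : pvPairs (l :: t)
                = (PySem.Str.strip l, v) :: pvPairs rest := by
              simp only [pvPairs]
              rw [if_neg hk]
              split <;> simp_all
            rw [step]
            simp only [List.map_cons, List.filter_cons]
            rw [e]
            simp only [hk, decide_not, ne_eq]
            rw [if_pos (by simp)]
            simp [pvPairUp, ih rest hr]
  intro ls; exact main ls.length ls (Nat.le_refl _)

-- dict(ps) is the left fold of insert over the pair list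
theorem pvOfList_foldl (ps : List (String × String)) :
    PySem.Dict.ofList ps = ps.foldl (fun d p => d.insert p.1 p.2) PySem.Dict.empty := rfl

-- ===== VERDICT =====
theorem convert_text_to_json_spec : Claim_equal_convert_text_to_json := by
  intro text _
  show _ = _
  unfold convert_text_to_json convert_text_to_json_alt
  rw [pvALoop_eq, pvPairs_eq, pvOfList_foldl]
  rfl
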